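-- pv_equiv track=rewrite | github.com/tamim/codinginterviewbook | max_distance/solution.py | maximum_gap
-- ===== SOURCE A (Python) =====
-- def maximum_gap(A):
--     numbers = []
--     for i, num in enumerate(A):
--         numbers.append((num, i))
--     numbers.sort()
--
--     max_gap = 0
--     min_number = numbers[0][1]
--
--     for item in numbers:
--         num = item[1]
--         if num <= min_number:
--             min_number = num
--         else:
--             max_gap = max(max_gap, num - min_number)
--     return max_gap
-- ===== SOURCE B (Python) =====
-- def maximum_gap(A):
--     n = len(A)
--     if n == 0:
--         return 0
--     min_left = []
--     m = A[0]
--     for x in A: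
--         m = min(m, x)
--         min_left.append(m)
--     max_right = []
--     m = A[-1]
--     for x in reversed(A):
--         m = max(m, x)
--         max_right.append(m)
--     max_right.reverse()
--     best = 0
--     i = 0
--     for j in range(n):
--         while min_left[i] > max_right[j]:
--             i += 1
--         if j - i > best:
--             best = j - i
--     return best
-- ===== Notes on version B (the rewrite author's own statement) =====
-- stated objective: alternative
-- what changed: Replaces sort-the-(value,index)-pairs-then-scan with a sort-free pass: prefix-minimum and suffix-maximum arrays consumed by a monotone two-pointer sweep.
import Mathlib
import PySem

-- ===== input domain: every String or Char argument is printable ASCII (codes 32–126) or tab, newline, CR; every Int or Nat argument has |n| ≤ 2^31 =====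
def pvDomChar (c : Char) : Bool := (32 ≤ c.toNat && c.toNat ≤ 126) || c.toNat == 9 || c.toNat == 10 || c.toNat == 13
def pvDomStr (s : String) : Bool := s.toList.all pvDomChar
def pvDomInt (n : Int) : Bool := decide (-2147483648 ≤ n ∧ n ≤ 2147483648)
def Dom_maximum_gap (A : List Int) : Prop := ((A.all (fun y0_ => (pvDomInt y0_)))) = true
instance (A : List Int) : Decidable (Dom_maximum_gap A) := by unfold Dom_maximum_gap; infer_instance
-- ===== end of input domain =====

-- B replaces A's sort-the-(value,index)-pairs-then-scan with a sort-free prefix-minimum /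
-- suffix-maximum two-pointer sweep (a different algorithm); equal return values on all non-empty lists.

-- ===== PORT A =====
def maximum_gap (A : List Int) : Int :=
  let numbers : List (Int × Int) :=
    (PySem.List.enumerate A).foldl (fun acc p => acc ++ [(p.2, p.1)]) []
  let srt := PySem.List.sorted2 numbers (fun p => p.1) (fun p => p.2)
  match PySem.List.pyGet? srt 0 with
  | none => 0    -- numbers[0]: IndexError on empty A; excluded by Pre_
  | some first =>
    (srt.foldl
      (fun (st : Int × Int) item =>
        if item.2 ≤ st.2 then (st.1, item.2)
        else (max st.1 (item.2 - st.2), st.2))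
      (0, first.2)).1

-- ===== PORT B =====
-- the 'while min_left[i] > max_right[j]: i += 1' loop of Source B (fuel = len(A) bounds the total climb)
def pvAdvance (minLeft : List Int) (v : Int) : Nat → Int → Int
  | 0, i => i
  | f + 1, i => if v < PySem.List.pyGetD minLeft i 0 then pvAdvance minLeft v f (i + 1) else i

def maximum_gap_alt (A : List Int) : Int :=
  let n : Int := A.length
  if n = 0 then 0
  else
    let minLeft := (A.foldl
      (fun (s : List Int × Int) x => (s.1 ++ [min s.2 x], min s.2 x))
      ([], PySem.List.pyGetD A 0 0)).1
    let maxRight := ((A.reverse.foldl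
      (fun (s : List Int × Int) x => (s.1 ++ [max s.2 x], max s.2 x))
      ([], PySem.List.pyGetD A (-1) 0)).1).reverse
    ((PySem.List.pyRange 0 n).foldl
      (fun (s : Int × Int) j =>
        let i := pvAdvance minLeft (PySem.List.pyGetD maxRight j 0) A.length s.2
        if s.1 < j - i then (j - i, i) else (s.1, i))
      (0, 0)).1

-- ===== PRECONDITION & SPEC =====
-- Pre_ excludes only the empty list, on which A raises IndexError (it reads numbers[0]).
def Pre_maximum_gap (A : List Int) : Prop := A ≠ []
instance (A : List Int) : Decidable (Pre_maximum_gap A) := by unfold Pre_maximum_gap; infer_instance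
def pvWitness_maximum_gap : List Int := [1, -2, 3]

def Spec_maximum_gap (A : List Int) (out : Int) : Prop := out = maximum_gap_alt A
instance (A : List Int) (out : Int) : Decidable (Spec_maximum_gap A out) := by unfold Spec_maximum_gap; infer_instance

-- ===== CLAIM (what is proved, stated in full; the proofs are below) =====
def Claim_equal_maximum_gap : Prop := ∀ (A : List Int), Dom_maximum_gap A → Pre_maximum_gap A → Spec_maximum_gap A (maximum_gap A)

-- ===== LEMMAS AND PROOFS =====

/-! The common value both programs compute: `max 0 (sup {j - i : i < j < |A|, A[i] ≤ A[j]})`.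
`pvGood A d` says `d` is an achievable gap; both ports are shown to return a value that is
`≥ 0`, an upper bound of all achievable gaps, and (unless 0) dominated by an achievable gap. -/
def pvGood (A : List Int) (d : Int) : Prop :=
  ∃ i j : Nat, ∃ (hij : i < j) (hj : j < A.length),
    A[i]'(by omega) ≤ A[j]'hj ∧ d = (j : Int) - (i : Int)

theorem pv_unique {A : List Int} {r s : Int}
    (hr : 0 ≤ r ∧ (∀ d, pvGood A d → d ≤ r) ∧ (r = 0 ∨ ∃ d, pvGood A d ∧ r ≤ d))
    (hs : 0 ≤ s ∧ (∀ d, pvGood A d → d ≤ s) ∧ (s = 0 ∨ ∃ d, pvGood A d ∧ s ≤ d)) :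
    r = s := by
  obtain ⟨hr0, hrub, hrat⟩ := hr
  obtain ⟨hs0, hsub, hsat⟩ := hs
  apply le_antisymm
  · rcases hrat with h | ⟨d, hd, hle⟩
    · omega
    · exact le_trans hle (hsub d hd)
  · rcases hsat with h | ⟨d, hd, hle⟩
    · omega
    · exact le_trans hle (hrub d hd)

-- ---------- A side ----------

theorem sorted2_eq_lex (xs : List (Int × Int)) :
    PySem.List.sorted2 xs (fun p => p.1) (fun p => p.2) =
    PySem.List.sorted xs (fun p => toLex p) := by
  rw [PySem.List.sorted_eq_foldl_insertBy]
  show xs.foldl (fun acc x => PySem.List.insertBy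
      (fun a b => decide (a.1 < b.1) || (!decide (b.1 < a.1) && decide (a.2 < b.2))) x acc) [] = _
  have hfun : (fun (a b : Int × Int) => decide (a.1 < b.1) || (!decide (b.1 < a.1) && decide (a.2 < b.2)))
      = (fun (a b : Int × Int) => decide (toLex a < toLex b)) := by
    funext a b
    have h : (toLex a < toLex b) ↔ (a.1 < b.1 ∨ (a.1 = b.1 ∧ a.2 < b.2)) := Prod.Lex.toLex_lt_toLex
    by_cases h1 : a.1 < b.1 <;> by_cases h2 : b.1 < a.1 <;> by_cases h3 : a.2 < b.2 <;>
      simp [h, h1, h2, h3] <;> omega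
  rw [hfun]

def pvRunU : List (Int × Int) → Int → Int → Int × Int
  | [], g, m => (g, m)
  | x :: t, g, m => pvRunU t (max g (x.2 - m)) (min m x.2)

theorem pvRunU_ge : ∀ (L : List (Int × Int)) (g m : Int), g ≤ (pvRunU L g m).1 := by
  intro L
  induction L with
  | nil => intro g m; simp [pvRunU]
  | cons x t ih =>
    intro g m
    exact le_trans (le_max_left _ _) (ih (max g (x.2 - m)) (min m x.2))

theorem pvRunU_mem_lb : ∀ (L : List (Int × Int)) (g m : Int) (p : Int × Int),
    p ∈ L → p.2 - m ≤ (pvRunU L g m).1 := by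
  intro L
  induction L with
  | nil => intro g m p hp; simp at hp
  | cons x t ih =>
    intro g m p hp
    rcases List.mem_cons.mp hp with h | h
    · subst h
      have h1 : p.2 - m ≤ max g (p.2 - m) := le_max_right _ _
      exact le_trans h1 (pvRunU_ge t _ _)
    · have := ih (max g (x.2 - m)) (min m x.2) p h
      have h2 : p.2 - m ≤ p.2 - min m x.2 := by
        have := min_le_left m x.2; omega
      calc p.2 - m ≤ p.2 - min m x.2 := h2
        _ ≤ _ := this

theorem pvRunU_pair_lb : ∀ (L : List (Int × Int)) (g m : Int) (p q : Int × Int),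
    [p, q].Sublist L → q.2 - p.2 ≤ (pvRunU L g m).1 := by
  intro L
  induction L with
  | nil => intro g m p q h; simp at h
  | cons x t ih =>
    intro g m p q h
    cases h with
    | cons _ h' => exact ih _ _ p q h'
    | cons₂ _ h' =>
      have hq : q ∈ t := List.singleton_sublist.mp h'
      have h1 : q.2 - x.2 ≤ q.2 - min m x.2 := by have := min_le_right m x.2; omega
      exact le_trans h1 (pvRunU_mem_lb t _ _ q hq)

theorem pvRunU_attain : ∀ (L : List (Int × Int)) (g m : Int),
    (pvRunU L g m).1 = g ∨ (∃ p ∈ L, (pvRunU L g m).1 = p.2 - m) ∨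
    (∃ p q, [p, q].Sublist L ∧ (pvRunU L g m).1 = q.2 - p.2) := by
  intro L
  induction L with
  | nil => intro g m; left; rfl
  | cons x t ih =>
    intro g m
    have hU : pvRunU (x :: t) g m = pvRunU t (max g (x.2 - m)) (min m x.2) := rfl
    rw [hU]
    rcases ih (max g (x.2 - m)) (min m x.2) with h | ⟨p, hp, h⟩ | ⟨p, q, hs, h⟩
    · rcases max_choice g (x.2 - m) with hm | hm
      · left; rw [h]; exact hm
      · right; left; exact ⟨x, List.mem_cons_self .., by rw [h]; exact hm⟩
    · rcases min_choice m x.2 with hm | hm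
      · right; left; exact ⟨p, List.mem_cons_of_mem _ hp, by rw [h, hm]⟩
      · right; right
        exact ⟨x, p, List.Sublist.cons₂ x (List.singleton_sublist.mpr hp), by rw [h, hm]⟩
    · right; right; exact ⟨p, q, hs.cons x, h⟩

theorem pvFoldA_eq_runU : ∀ (L : List (Int × Int)) (g m : Int), 0 ≤ g →
    L.foldl (fun (st : Int × Int) item =>
        if item.2 ≤ st.2 then (st.1, item.2)
        else (max st.1 (item.2 - st.2), st.2)) (g, m) = pvRunU L g m := by
  intro L
  induction L with
  | nil => intro g m _; rfl
  | cons x t ih =>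
    intro g m hg
    show List.foldl _ (if x.2 ≤ m then (g, x.2) else (max g (x.2 - m), m)) t = _
    have hg' : 0 ≤ max g (x.2 - m) := le_trans hg (le_max_left _ _)
    by_cases h : x.2 ≤ m
    · rw [if_pos h]
      have e1 : max g (x.2 - m) = g := by omega
      have e2 : min m x.2 = x.2 := by omega
      show _ = pvRunU t (max g (x.2 - m)) (min m x.2)
      rw [e1, e2]; exact ih g x.2 hg
    · rw [if_neg h]
      have e2 : min m x.2 = m := by omega
      show _ = pvRunU t (max g (x.2 - m)) (min m x.2)
      rw [e2]; exact ih _ m hg'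

theorem pv_pair_sublist_of_mem {α : Type} {R : α → α → Prop}
    (hA : ∀ a b, R a b → ¬ R b a) :
    ∀ {L : List α}, L.Pairwise R → ∀ {p q : α}, p ∈ L → q ∈ L → R p q → [p, q].Sublist L := by
  intro L
  induction L with
  | nil => intro _ p q hp; simp at hp
  | cons x t ih =>
    intro hpw p q hp hq hR
    rcases List.mem_cons.mp hp with rfl | hp'
    · have hq' : q ∈ t := by
        rcases List.mem_cons.mp hq with rfl | h
        · exact absurd hR (hA _ _ hR)
        · exact h
      exact List.Sublist.cons₂ p (List.singleton_sublist.mpr hq')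
    · rcases List.mem_cons.mp hq with rfl | hq'
      · exact absurd hR (hA _ _ ((List.pairwise_cons.mp hpw).1 p hp'))
      · exact (ih (List.pairwise_cons.mp hpw).2 hp' hq' hR).cons x

theorem pvA_isres (A : List Int) (hA : A ≠ []) :
    0 ≤ maximum_gap A ∧ (∀ d, pvGood A d → d ≤ maximum_gap A) ∧
    (maximum_gap A = 0 ∨ ∃ d, pvGood A d ∧ maximum_gap A ≤ d) := by
  have hnum : (PySem.List.enumerate A).foldl (fun acc p => acc ++ [(p.2, p.1)]) []
      = (PySem.List.enumerate A).map (fun p => (p.2, p.1)) := by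
    rw [PySem.List.foldl_append_singleton_eq_map (f := fun p : Int × Int => (p.2, p.1))]
    simp
  set N : List (Int × Int) := (PySem.List.enumerate A).map (fun p => (p.2, p.1)) with hNdef
  have hSlex := sorted2_eq_lex N
  set S := PySem.List.sorted N (fun p => toLex p) with hSdef
  have hNne : N ≠ [] := by
    simp only [hNdef, ne_eq, List.map_eq_nil_iff]
    intro h
    have := PySem.List.length_enumerate A (0 : Int)
    rw [h] at this
    simp at this
    exact hA (List.eq_nil_of_length_eq_zero this.symm)
  have hSne : S ≠ [] := by
    rw [hSdef]
    intro h
    exact hNne ((PySem.List.sorted_eq_nil_iff _ _ _).mp h)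
  obtain ⟨x0, T, hS⟩ := List.exists_cons_of_ne_nil hSne
  have hget : PySem.List.pyGet? S 0 = some x0 := by
    rw [hS]; simp [PySem.List.pyGet?, PySem.List.pyIdx?]
  have hmg : maximum_gap A = (pvRunU S 0 x0.2).1 := by
    simp only [maximum_gap, hnum, hSlex, ← hNdef, ← hSdef, hget]
    exact congrArg Prod.fst (pvFoldA_eq_runU S 0 x0.2 (le_refl 0))
  -- membership characterization
  have hmemS : ∀ r : Int × Int, r ∈ S ↔ ∃ k : Nat, ∃ hk : k < A.length, r = (A[k]'hk, (k : Int)) := by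
    intro r
    rw [(PySem.List.sorted_perm N _ _).mem_iff, hNdef, List.mem_map]
    constructor
    · rintro ⟨p, hp, rfl⟩
      obtain ⟨k, hk, rfl⟩ := (PySem.List.mem_enumerate_iff A 0 p).mp hp
      exact ⟨k, hk, by simp⟩
    · rintro ⟨k, hk, rfl⟩
      refine ⟨((k : Int), A[k]'hk), ?_, by simp⟩
      exact (PySem.List.mem_enumerate_iff A 0 _).mpr ⟨k, hk, by simp⟩
  -- strict pairwise
  have hnodN : N.Nodup := by
    apply List.Nodup.map
    · intro a b h
      simpa [Prod.ext_iff, and_comm] using h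
    · exact (PySem.List.pairwise_lt_enumerate A 0).imp (fun h => by
        intro he; rw [he] at h; exact lt_irrefl _ h)
  have hnodS : S.Nodup := ((PySem.List.sorted_perm N _ _).nodup_iff).mpr hnodN
  have hle : S.Pairwise (fun a b => toLex a ≤ toLex b) := by
    rw [hSdef]; exact PySem.List.sorted_pairwise N _
  have hpairlt : S.Pairwise (fun a b : Int × Int => toLex a < toLex b) := by
    have := hle.and hnodS
    exact this.imp (fun {a b} h => lt_of_le_of_ne h.1 (fun e => h.2 (toLex.injective e)))
  have hasymm : ∀ a b : Int × Int, toLex a < toLex b → ¬ toLex b < toLex a :=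
    fun a b h => lt_asymm h
  -- generic pair handler for the attainment case
  have hpaircase : ∀ p q : Int × Int, [p, q].Sublist S → (pvRunU S 0 x0.2).1 = q.2 - p.2 →
      (maximum_gap A = 0 ∨ ∃ d, pvGood A d ∧ maximum_gap A ≤ d) := by
    intro p q hsub heq
    have hlexpq : toLex p < toLex q := by
      have hpw : List.Pairwise (fun a b : Int × Int => toLex a < toLex b) [p, q] :=
        hpairlt.sublist hsub
      exact (List.pairwise_cons.mp hpw).1 q (List.mem_singleton_self q)
    obtain ⟨ip, hip, hpe⟩ := (hmemS p).mp (hsub.subset (by simp))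
    obtain ⟨jq, hjq, hqe⟩ := (hmemS q).mp (hsub.subset (by simp))
    by_cases hij : ip < jq
    · right
      have hlexiff := (Prod.Lex.toLex_lt_toLex (x := p) (y := q))
      have hAle : A[ip]'hip ≤ A[jq]'hjq := by
        rcases hlexiff.mp hlexpq with h | h
        · rw [hpe, hqe] at h; exact le_of_lt h
        · rw [hpe, hqe] at h; exact le_of_eq h.1
      refine ⟨(jq : Int) - (ip : Int), ⟨ip, jq, hij, hjq, hAle, rfl⟩, ?_⟩
      rw [hmg, heq, hpe, hqe]
    · left
      have h0 : 0 ≤ maximum_gap A := by rw [hmg]; exact pvRunU_ge S 0 x0.2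
      have : maximum_gap A = (jq : Int) - (ip : Int) := by rw [hmg, heq, hpe, hqe]
      omega
  refine ⟨by rw [hmg]; exact pvRunU_ge S 0 x0.2, ?_, ?_⟩
  · rintro d ⟨i, j, hij, hj, hle', rfl⟩
    have hp : ((A[i]'(by omega), (i : Int)) : Int × Int) ∈ S := (hmemS _).mpr ⟨i, by omega, rfl⟩
    have hq : ((A[j]'hj, (j : Int)) : Int × Int) ∈ S := (hmemS _).mpr ⟨j, hj, rfl⟩
    have hlexpq : toLex ((A[i]'(by omega), (i : Int)) : Int × Int) < toLex ((A[j]'hj, (j : Int)) : Int × Int) := by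
      rw [Prod.Lex.toLex_lt_toLex]
      rcases lt_or_eq_of_le hle' with h | h
      · exact Or.inl h
      · exact Or.inr ⟨h, by show (i:Int) < (j:Int); exact_mod_cast hij⟩
    have hsub := pv_pair_sublist_of_mem hasymm hpairlt hp hq hlexpq
    have := pvRunU_pair_lb S 0 x0.2 _ _ hsub
    rw [hmg]
    simpa using this
  · have hred : pvRunU S 0 x0.2 = pvRunU T 0 x0.2 := by
      rw [hS]
      show pvRunU T (max 0 (x0.2 - x0.2)) (min x0.2 x0.2) = _
      simp
    rcases pvRunU_attain T 0 x0.2 with h | ⟨p, hp, h⟩ | ⟨p, q, hsub, h⟩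
    · left; rw [hmg, hred, h]
    · exact hpaircase x0 p
        (by rw [hS]; exact List.Sublist.cons₂ x0 (List.singleton_sublist.mpr hp))
        (by rw [hred, h])
    · exact hpaircase p q (by rw [hS]; exact hsub.cons x0) (by rw [hred, h])

def pvPmins : List Int → List Int
  | [] => []
  | x :: t => x :: (pvPmins t).map (fun q => min x q)

theorem pvPmins_length : ∀ (A : List Int), (pvPmins A).length = A.length := by
  intro A; induction A with
  | nil => rfl
  | cons x t ih => simp [pvPmins, ih]

theorem pvPmins_le : ∀ (A : List Int) (k p : Nat) (hp : p ≤ k) (hk : k < A.length),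
    (pvPmins A)[k]'(by rw [pvPmins_length]; omega) ≤ A[p]'(by omega) := by
  intro A
  induction A with
  | nil => intro k p _ hk; simp at hk
  | cons x t ih =>
    intro k p hp hk
    match k, p with
    | 0, 0 => simp [pvPmins]
    | k + 1, 0 =>
      have : (pvPmins (x :: t))[k+1]'(by rw [pvPmins_length]; simpa using hk)
          = min x ((pvPmins t)[k]'(by rw [pvPmins_length]; simpa using hk)) := by
        simp [pvPmins]
      rw [this]; simpa using min_le_left _ _
    | k + 1, p + 1 =>
      have hk' : k < t.length := by simpa using hk
      have : (pvPmins (x :: t))[k+1]'(by rw [pvPmins_length]; simpa using hk)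
          = min x ((pvPmins t)[k]'(by rw [pvPmins_length]; exact hk')) := by
        simp [pvPmins]
      rw [this]
      exact le_trans (min_le_right _ _) (ih k p (by omega) hk')

theorem pvPmins_attain : ∀ (A : List Int) (k : Nat) (hk : k < A.length),
    ∃ p : Nat, p ≤ k ∧ ∃ hp : p < A.length,
      (pvPmins A)[k]'(by rw [pvPmins_length]; omega) = A[p]'hp := by
  intro A
  induction A with
  | nil => intro k hk; simp at hk
  | cons x t ih =>
    intro k hk
    match k with
    | 0 => exact ⟨0, le_refl _, by simp, by simp [pvPmins]⟩
    | k + 1 =>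
      have hk' : k < t.length := by simpa using hk
      have hg : (pvPmins (x :: t))[k+1]'(by rw [pvPmins_length]; simpa using hk)
          = min x ((pvPmins t)[k]'(by rw [pvPmins_length]; exact hk')) := by
        simp [pvPmins]
      rcases min_choice x ((pvPmins t)[k]'(by rw [pvPmins_length]; exact hk')) with hm | hm
      · exact ⟨0, by omega, by simp, by rw [hg, hm]; simp⟩
      · obtain ⟨p, hpk, hp, he⟩ := ih k hk'
        exact ⟨p + 1, by omega, by simpa using hp, by rw [hg, hm]; simpa using he⟩

def pvPmaxs : List Int → List Int
  | [] => []
  | x :: t => x :: (pvPmaxs t).map (fun q => max x q)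

theorem pvPmaxs_length : ∀ (A : List Int), (pvPmaxs A).length = A.length := by
  intro A; induction A with
  | nil => rfl
  | cons x t ih => simp [pvPmaxs, ih]

theorem pvPmaxs_ge : ∀ (A : List Int) (k p : Nat) (hp : p ≤ k) (hk : k < A.length),
    A[p]'(by omega) ≤ (pvPmaxs A)[k]'(by rw [pvPmaxs_length]; omega) := by
  intro A
  induction A with
  | nil => intro k p _ hk; simp at hk
  | cons x t ih =>
    intro k p hp hk
    match k, p with
    | 0, 0 => simp [pvPmaxs]
    | k + 1, 0 =>
      have : (pvPmaxs (x :: t))[k+1]'(by rw [pvPmaxs_length]; simpa using hk)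
          = max x ((pvPmaxs t)[k]'(by rw [pvPmaxs_length]; simpa using hk)) := by
        simp [pvPmaxs]
      rw [this]; simpa using le_max_left _ _
    | k + 1, p + 1 =>
      have hk' : k < t.length := by simpa using hk
      have : (pvPmaxs (x :: t))[k+1]'(by rw [pvPmaxs_length]; simpa using hk)
          = max x ((pvPmaxs t)[k]'(by rw [pvPmaxs_length]; exact hk')) := by
        simp [pvPmaxs]
      rw [this]
      exact le_trans (ih k p (by omega) hk') (le_max_right _ _)

theorem pvPmaxs_attain : ∀ (A : List Int) (k : Nat) (hk : k < A.length),
    ∃ p : Nat, p ≤ k ∧ ∃ hp : p < A.length,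
      (pvPmaxs A)[k]'(by rw [pvPmaxs_length]; omega) = A[p]'hp := by
  intro A
  induction A with
  | nil => intro k hk; simp at hk
  | cons x t ih =>
    intro k hk
    match k with
    | 0 => exact ⟨0, le_refl _, by simp, by simp [pvPmaxs]⟩
    | k + 1 =>
      have hk' : k < t.length := by simpa using hk
      have hg : (pvPmaxs (x :: t))[k+1]'(by rw [pvPmaxs_length]; simpa using hk)
          = max x ((pvPmaxs t)[k]'(by rw [pvPmaxs_length]; exact hk')) := by
        simp [pvPmaxs]
      rcases max_choice x ((pvPmaxs t)[k]'(by rw [pvPmaxs_length]; exact hk')) with hm | hm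
      · exact ⟨0, by omega, by simp, by rw [hg, hm]; simp⟩
      · obtain ⟨p, hpk, hp, he⟩ := ih k hk'
        exact ⟨p + 1, by omega, by simpa using hp, by rw [hg, hm]; simpa using he⟩

theorem pvMinScan : ∀ (L : List Int) (acc : List Int) (m : Int),
    (L.foldl (fun (s : List Int × Int) x => (s.1 ++ [min s.2 x], min s.2 x)) (acc, m)).1
      = acc ++ (pvPmins L).map (fun q => min m q) := by
  intro L
  induction L with
  | nil => intro acc m; simp [pvPmins]
  | cons x t ih =>
    intro acc m
    show (t.foldl _ (acc ++ [min m x], min m x)).1 = _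
    rw [ih]
    simp only [pvPmins, List.map_map, Function.comp, List.map_cons, List.append_assoc,
      List.singleton_append]
    congr 1
    congr 1
    apply List.map_congr_left
    intro a _
    show min (min m x) a = min m (min x a)
    rw [min_assoc]

theorem pvMaxScan : ∀ (L : List Int) (acc : List Int) (m : Int),
    (L.foldl (fun (s : List Int × Int) x => (s.1 ++ [max s.2 x], max s.2 x)) (acc, m)).1
      = acc ++ (pvPmaxs L).map (fun q => max m q) := by
  intro L
  induction L with
  | nil => intro acc m; simp [pvPmaxs]
  | cons x t ih =>
    intro acc m
    show (t.foldl _ (acc ++ [max m x], max m x)).1 = _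
    rw [ih]
    simp only [pvPmaxs, List.map_map, Function.comp, List.map_cons, List.append_assoc,
      List.singleton_append]
    congr 1
    congr 1
    apply List.map_congr_left
    intro a _
    show max (max m x) a = max m (max x a)
    rw [max_assoc]

theorem pvAdvance_spec (pm : List Int) (v : Int) : ∀ (f : Nat) (i : Int), 0 ≤ i →
    (∃ k : Nat, i ≤ (k : Int) ∧ k < pm.length ∧ pm.getD k 0 ≤ v ∧ (k : Int) - i < (f : Int)) →
    ∃ r : Nat, pvAdvance pm v f i = (r : Int) ∧ i ≤ (r : Int) ∧ r < pm.length ∧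
      pm.getD r 0 ≤ v ∧ ∀ p : Nat, i ≤ (p : Int) → p < r → v < pm.getD p 0 := by
  intro f
  induction f with
  | zero =>
    rintro i hi ⟨k, hik, _, _, hf⟩
    exfalso; omega
  | succ f ih =>
    rintro i hi ⟨k, hik, hk, hkv, hf⟩
    have hilen : i < (pm.length : Int) := by omega
    have hgd : PySem.List.pyGetD pm i 0 = pm.getD i.toNat 0 := PySem.List.pyGetD_of_nonneg pm 0 hi
    have hstep : pvAdvance pm v (f + 1) i
        = (if v < PySem.List.pyGetD pm i 0 then pvAdvance pm v f (i + 1) else i) := rfl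
    by_cases hc : v < PySem.List.pyGetD pm i 0
    · -- i itself fails the test: keep climbing
      have hki : i < (k : Int) := by
        rcases lt_or_eq_of_le hik with h | h
        · exact h
        · exfalso
          rw [hgd] at hc
          have : i.toNat = k := by omega
          rw [this] at hc
          omega
      obtain ⟨r, hre, hr1, hr2, hr3, hr4⟩ := ih (i + 1) (by omega) ⟨k, by omega, hk, hkv, by push_cast; omega⟩
      refine ⟨r, by rw [hstep, if_pos hc]; exact hre, by omega, hr2, hr3, ?_⟩
      intro p hp1 hp2
      rcases lt_or_eq_of_le hp1 with h | h
      · exact hr4 p (by omega) hp2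
      · have : i.toNat = p := by omega
        rw [hgd, this] at hc
        exact hc
    · -- found it
      refine ⟨i.toNat, ?_, by omega, by omega, ?_, ?_⟩
      · rw [hstep, if_neg hc]; omega
      · rw [hgd] at hc; omega
      · intro p hp1 hp2; exfalso; omega

theorem pvPm_le (A : List Int) (k p : Nat) (hp : p ≤ k) (hk : k < A.length) :
    (pvPmins A).getD k 0 ≤ A.getD p 0 := by
  rw [List.getD_eq_getElem _ 0 (by rw [pvPmins_length]; omega),
      List.getD_eq_getElem _ 0 (by omega)]
  exact pvPmins_le A k p hp hk

theorem pvPm_attain (A : List Int) (k : Nat) (hk : k < A.length) :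
    ∃ p : Nat, p ≤ k ∧ p < A.length ∧ (pvPmins A).getD k 0 = A.getD p 0 := by
  obtain ⟨p, hpk, hp, he⟩ := pvPmins_attain A k hk
  refine ⟨p, hpk, hp, ?_⟩
  rw [List.getD_eq_getElem _ 0 (by rw [pvPmins_length]; omega), List.getD_eq_getElem _ 0 hp]
  exact he

theorem pvR_length (A : List Int) : ((pvPmaxs A.reverse).reverse).length = A.length := by
  rw [List.length_reverse, pvPmaxs_length, List.length_reverse]

theorem pvR_getD (A : List Int) (j : Nat) (hj : j < A.length) :
    ((pvPmaxs A.reverse).reverse).getD j 0 = (pvPmaxs A.reverse).getD (A.length - 1 - j) 0 := by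
  rw [List.getD_eq_getElem _ 0 (by rw [pvR_length]; omega),
      List.getD_eq_getElem _ 0 (by rw [pvPmaxs_length, List.length_reverse]; omega)]
  rw [List.getElem_reverse]
  apply getElem_congr rfl
  rw [pvPmaxs_length, List.length_reverse]

theorem pvAgetD_rev (A : List Int) (q : Nat) (hq : q < A.length) :
    A.reverse.getD (A.length - 1 - q) 0 = A.getD q 0 := by
  rw [List.getD_eq_getElem _ 0 (by rw [List.length_reverse]; omega),
      List.getD_eq_getElem _ 0 (by omega), List.getElem_reverse]
  apply getElem_congr rfl
  omega

theorem pvR_ge (A : List Int) (j q : Nat) (hjq : j ≤ q) (hq : q < A.length) :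
    A.getD q 0 ≤ ((pvPmaxs A.reverse).reverse).getD j 0 := by
  rw [pvR_getD A j (by omega), ← pvAgetD_rev A q hq]
  rw [List.getD_eq_getElem _ 0 (by rw [List.length_reverse]; omega),
      List.getD_eq_getElem _ 0 (by rw [pvPmaxs_length, List.length_reverse]; omega)]
  exact pvPmaxs_ge A.reverse (A.length - 1 - j) (A.length - 1 - q) (by omega)
    (by rw [List.length_reverse]; omega)

theorem pvR_attain (A : List Int) (j : Nat) (hj : j < A.length) :
    ∃ q : Nat, j ≤ q ∧ q < A.length ∧
      ((pvPmaxs A.reverse).reverse).getD j 0 = A.getD q 0 := by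
  obtain ⟨p, hpk, hp, he⟩ := pvPmaxs_attain A.reverse (A.length - 1 - j)
    (by rw [List.length_reverse]; omega)
  have hp' : p < A.length := by rw [List.length_reverse] at hp; omega
  refine ⟨A.length - 1 - p, by omega, by omega, ?_⟩
  rw [pvR_getD A j hj, ← pvAgetD_rev A (A.length - 1 - p) (by omega)]
  have h1 : A.length - 1 - (A.length - 1 - p) = p := by omega
  rw [h1]
  rw [List.getD_eq_getElem _ 0 (by rw [pvPmaxs_length, List.length_reverse]; omega),
      List.getD_eq_getElem _ 0 hp]
  exact he

theorem pvR_antitone (A : List Int) (j j' : Nat) (hjj : j ≤ j') (hj' : j' < A.length) :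
    ((pvPmaxs A.reverse).reverse).getD j' 0 ≤ ((pvPmaxs A.reverse).reverse).getD j 0 := by
  obtain ⟨q, hq1, hq2, hq3⟩ := pvR_attain A j' hj'
  rw [hq3]
  exact pvR_ge A j q (by omega) hq2

theorem pvLoop_inv (A : List Int) (hA : A ≠ []) : ∀ m : Nat, m ≤ A.length →
    ∃ (best : Int) (iN : Nat),
      (PySem.List.pyRange 0 (m : Int)).foldl
        (fun (s : Int × Int) j =>
          let i := pvAdvance (pvPmins A) (PySem.List.pyGetD ((pvPmaxs A.reverse).reverse) j 0)
            A.length s.2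
          if s.1 < j - i then (j - i, i) else (s.1, i))
        (0, 0) = (best, (iN : Int)) ∧
      (m = 0 → iN = 0) ∧
      (0 < m → iN < m ∧ ∀ p : Nat, p < iN →
        ((pvPmaxs A.reverse).reverse).getD (m - 1) 0 < (pvPmins A).getD p 0) ∧
      0 ≤ best ∧
      (∀ j p : Nat, j < m → p < A.length →
        (pvPmins A).getD p 0 ≤ ((pvPmaxs A.reverse).reverse).getD j 0 →
        (j : Int) - (p : Int) ≤ best) ∧
      (best = 0 ∨ ∃ j p : Nat, p ≤ j ∧ j < A.length ∧
        (pvPmins A).getD p 0 ≤ ((pvPmaxs A.reverse).reverse).getD j 0 ∧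
        best = (j : Int) - (p : Int)) := by
  have hlenpos : 0 < A.length := List.length_pos_iff.mpr hA
  intro m
  induction m with
  | zero =>
    intro _
    refine ⟨0, 0, ?_, fun _ => rfl, by omega, le_refl 0, ?_, Or.inl rfl⟩
    · rw [PySem.List.pyRange_one_eq_nil (by omega)]; rfl
    · intro j p hj; omega
  | succ m ih =>
    intro hm1
    obtain ⟨best, iN, hfold, h0, hpos, hbest0, hub, hat⟩ := ih (by omega)
    have hmlen : m < A.length := by omega
    -- split the range and perform the step at j = m
    have hrng : PySem.List.pyRange 0 ((m + 1 : Nat) : Int)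
        = PySem.List.pyRange 0 (m : Int) ++ [(m : Int)] := by
      push_cast
      exact PySem.List.pyRange_one_succ_right (by omega)
    have hiNm : iN ≤ m := by
      rcases Nat.eq_zero_or_pos m with h | h
      · rw [h0 (by omega)]; omega
      · exact le_of_lt (hpos h).1
    -- R[m] as getD, and the advance call
    have hRm : PySem.List.pyGetD ((pvPmaxs A.reverse).reverse) (m : Int) 0
        = ((pvPmaxs A.reverse).reverse).getD m 0 := by
      rw [PySem.List.pyGetD_of_nonneg _ 0 (by omega)]
      norm_num
    have hpmRm : (pvPmins A).getD m 0 ≤ ((pvPmaxs A.reverse).reverse).getD m 0 :=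
      le_trans (pvPm_le A m m (le_refl m) hmlen) (pvR_ge A m m (le_refl m) hmlen)
    obtain ⟨r, hre, hr1, hr2, hr3, hr4⟩ :=
      pvAdvance_spec (pvPmins A) (((pvPmaxs A.reverse).reverse).getD m 0) A.length
        ((iN : Nat) : Int) (by omega)
        ⟨m, by exact_mod_cast hiNm, by rw [pvPmins_length]; omega, hpmRm, by
          have : (m : Int) < (A.length : Int) := by exact_mod_cast hmlen
          omega⟩
    have hrlen : r < A.length := by rw [pvPmins_length] at hr2; exact hr2
    have hrm : r ≤ m := by
      by_contra hcon
      exact absurd hpmRm (not_le.mpr (hr4 m (by exact_mod_cast hiNm) (by omega)))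
    -- minimality of r against the WHOLE prefix [0, r)
    have hrmin : ∀ p : Nat, p < r →
        ((pvPmaxs A.reverse).reverse).getD m 0 < (pvPmins A).getD p 0 := by
      intro p hpr
      by_cases hpi : p < iN
      · have hm0 : 0 < m := by
          rcases Nat.eq_zero_or_pos m with h | h
          · exfalso; rw [h0 h] at hpi; omega
          · exact h
        have := (hpos hm0).2 p hpi
        calc ((pvPmaxs A.reverse).reverse).getD m 0
            ≤ ((pvPmaxs A.reverse).reverse).getD (m - 1) 0 :=
              pvR_antitone A (m - 1) m (by omega) hmlen
          _ < _ := this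
      · exact hr4 p (by omega) hpr
    -- the new state
    refine ⟨if best < (m : Int) - (r : Int) then (m : Int) - (r : Int) else best, r, ?_, ?_, ?_, ?_, ?_, ?_⟩
    · rw [hrng, List.foldl_append, hfold]
      show (if best < (m : Int) - pvAdvance (pvPmins A) _ A.length (iN : Int) then _ else _) = _
      rw [hRm, hre]
      by_cases hc : best < (m : Int) - (r : Int)
      · rw [if_pos hc, if_pos hc]
      · rw [if_neg hc, if_neg hc]
    · omega
    · intro _
      refine ⟨by omega, ?_⟩
      intro p hpr
      have h1 : (m + 1 - 1 : Nat) = m := by omega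
      rw [h1]
      exact hrmin p hpr
    · split_ifs with hc
      · omega
      · exact hbest0
    · intro j p hj hp hle
      by_cases hjm : j < m
      · have := hub j p hjm hp hle
        split_ifs with hc
        · omega
        · exact this
      · have hjeq : j = m := by omega
        subst hjeq
        have hrp : r ≤ p := by
          by_contra hcon
          exact absurd hle (not_le.mpr (hrmin p (by omega)))
        have : (j : Int) - (p : Int) ≤ (j : Int) - (r : Int) := by
          have : (r : Int) ≤ (p : Int) := by exact_mod_cast hrp
          omega
        split_ifs with hc <;> omega
    · split_ifs with hc
      · right
        exact ⟨m, r, hrm, hmlen, hr3, rfl⟩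
      · exact hat

theorem pvPmins_map_head (x : Int) (t : List Int) :
    (pvPmins (x :: t)).map (fun q => min x q) = pvPmins (x :: t) := by
  show (x :: (pvPmins t).map (fun q => min x q)).map (fun q => min x q)
      = x :: (pvPmins t).map (fun q => min x q)
  simp only [List.map_cons, List.map_map, min_self, List.cons.injEq, true_and]
  apply List.map_congr_left
  intro a _
  show min x (min x a) = min x a
  rw [← min_assoc, min_self]

theorem pvPmaxs_map_head (x : Int) (t : List Int) :
    (pvPmaxs (x :: t)).map (fun q => max x q) = pvPmaxs (x :: t) := by
  show (x :: (pvPmaxs t).map (fun q => max x q)).map (fun q => max x q)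
      = x :: (pvPmaxs t).map (fun q => max x q)
  simp only [List.map_cons, List.map_map, max_self, List.cons.injEq, true_and]
  apply List.map_congr_left
  intro a _
  show max x (max x a) = max x a
  rw [← max_assoc, max_self]

theorem pvGetLast (A : List Int) (y : Int) (rl : List Int) (h : A.reverse = y :: rl) :
    PySem.List.pyGetD A (-1) 0 = y := by
  have hlen : 0 < A.length := by
    have := congrArg List.length h
    simp at this
    omega
  have hidx : PySem.List.pyIdx? A.length (-1) = some (A.length - 1) := by
    show (if (0 : Int) ≤ -1 then _ else if -(A.length : Int) ≤ -1 then some (A.length - (-(-1 : Int)).toNat) else none) = _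
    rw [if_neg (by omega), if_pos (by omega)]
    norm_num
  show ((PySem.List.pyIdx? A.length (-1)).bind (fun k => A[k]?)).getD 0 = y
  rw [hidx]
  have hget : A[A.length - 1]? = some (A[A.length - 1]'(by omega)) :=
    List.getElem?_eq_getElem (by omega)
  show (A[A.length - 1]?).getD 0 = y
  rw [hget]
  show A[A.length - 1]'(by omega) = y
  have h0 : A.reverse[0]? = some y := by rw [h]; rfl
  rw [List.getElem?_eq_getElem (by rw [List.length_reverse]; omega)] at h0
  have h1 := Option.some.inj h0
  simp only [List.getElem_reverse] at h1
  rw [← h1]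
  apply getElem_congr rfl
  omega

theorem pvB_isres (A : List Int) (hA : A ≠ []) :
    0 ≤ maximum_gap_alt A ∧ (∀ d, pvGood A d → d ≤ maximum_gap_alt A) ∧
    (maximum_gap_alt A = 0 ∨ ∃ d, pvGood A d ∧ maximum_gap_alt A ≤ d) := by
  have hlenpos : 0 < A.length := List.length_pos_iff.mpr hA
  obtain ⟨x, t, hxt⟩ := List.exists_cons_of_ne_nil hA
  obtain ⟨y, rl, hyr⟩ := List.exists_cons_of_ne_nil (by
    simpa using (List.reverse_eq_nil_iff (xs := A)).not.mpr hA : A.reverse ≠ [])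
  have e0 : PySem.List.pyGetD A 0 0 = x := by
    rw [PySem.List.pyGetD_of_nonneg _ 0 le_rfl, hxt]; rfl
  have e1 : (A.foldl (fun (s : List Int × Int) x => (s.1 ++ [min s.2 x], min s.2 x))
      ([], PySem.List.pyGetD A 0 0)).1 = pvPmins A := by
    rw [e0, pvMinScan, List.nil_append]
    rw [hxt]
    exact pvPmins_map_head x t
  have e2 : ((A.reverse.foldl (fun (s : List Int × Int) x => (s.1 ++ [max s.2 x], max s.2 x))
      ([], PySem.List.pyGetD A (-1) 0)).1).reverse = (pvPmaxs A.reverse).reverse := by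
    rw [pvGetLast A y rl hyr, pvMaxScan, List.nil_append]
    rw [hyr]
    rw [pvPmaxs_map_head y rl]
  obtain ⟨best, iN, hfold, _, _, hbest0, hub, hat⟩ := pvLoop_inv A hA A.length (le_refl _)
  have hres : maximum_gap_alt A = best := by
    simp only [maximum_gap_alt]
    rw [if_neg (by exact_mod_cast Nat.pos_iff_ne_zero.mp hlenpos), e1, e2, hfold]
  rw [hres]
  refine ⟨hbest0, ?_, ?_⟩
  · rintro d ⟨i, j, hij, hj, hle, rfl⟩
    apply hub j i hj (by omega)
    calc (pvPmins A).getD i 0 ≤ A.getD i 0 := pvPm_le A i i (le_refl i) (by omega)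
      _ ≤ A.getD j 0 := by
          rw [List.getD_eq_getElem _ 0 (by omega), List.getD_eq_getElem _ 0 hj]; exact hle
      _ ≤ ((pvPmaxs A.reverse).reverse).getD j 0 := pvR_ge A j j (le_refl j) hj
  · rcases hat with h | ⟨j, p, hpj, hj, hle, heq⟩
    · exact Or.inl h
    · obtain ⟨i', hi'p, hi', hei⟩ := pvPm_attain A p (by omega)
      obtain ⟨q, hjq, hq, heq'⟩ := pvR_attain A j hj
      have hAle : A.getD i' 0 ≤ A.getD q 0 := by
        rw [← hei, ← heq']; exact hle
      by_cases hiq : i' < q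
      · right
        refine ⟨(q : Int) - (i' : Int), ⟨i', q, hiq, hq, ?_, rfl⟩, by omega⟩
        rw [← List.getD_eq_getElem _ 0 (by omega), ← List.getD_eq_getElem _ 0 hq]
        exact hAle
      · left
        have : i' = q ∨ q < i' := by omega
        omega

-- ===== VERDICT (by name: the statement is the Claim_ definition above) =====
theorem maximum_gap_spec : Claim_equal_maximum_gap := by
  intro A _ hpre
  unfold Spec_maximum_gap
  exact pv_unique (pvA_isres A hpre) (pvB_isres A hpre)
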